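-- pv_equiv track=rewrite | github.com/dabdul-wahab1988/HBMPRA | hbmpra_optimized.py | resolve_key_in_dict
-- ===== SOURCE A (Python) =====
-- from typing import Tuple, List, Dict, Optional, Mapping
--
-- def _base_key(name: str) -> str:
--     """Return alphabetic base for a species (e.g., 'CrVI'->'CrVI', 'Hg(II)'->'Hg')."""
--     if not name:
--         return ""
--     s = str(name)
--     # prefer letters and digits and remove parentheses
--     return "".join([ch for ch in s if ch.isalnum()])
--
-- def resolve_key_in_dict(key: str, d: Mapping[str, object]) -> Optional[str]:
--     """Try to find a matching key inside dict d for requested key.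
--
--     Resolution order: exact -> base alphabetic match -> case-insensitive match -> None
--     Returns the matching dict key (as present in d) or None if not found.
--     """
--     if key in d:
--         return key
--     base = _base_key(key)
--     # try base exact
--     if base in d:
--         return base
--     # case-insensitive search
--     low = key.lower()
--     for k in d.keys():
--         if str(k).lower() == low:
--             return k
--     # try alphabetic-only match against keys
--     for k in d.keys():
--         if _base_key(str(k)) == base:
--             return k
--     return None
-- ===== SOURCE B (Python) =====
-- def _base_key(name: str) -> str:
--     if not name:
--         return ""
--     s = str(name)
--     return "".join([ch for ch in s if ch.isalnum()])
--
-- def resolve_key_in_dict(key, d):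
--     if key in d:
--         return key
--     base = _base_key(key)
--     if base in d:
--         return base
--     # one pass: index keys by lowercase form and by alphanumeric base (first occurrence wins)
--     lower_index = {}
--     base_index = {}
--     for k in d.keys():
--         ks = str(k)
--         lower_index.setdefault(ks.lower(), k)
--         base_index.setdefault(_base_key(ks), k)
--     low = key.lower()
--     if low in lower_index:
--         return lower_index[low]
--     return base_index.get(base)
-- ===== Notes on version B (the rewrite author's own statement) =====
-- stated objective: idiomatic
-- what changed: A's two early-returning scans over d.keys() (case-insensitive, then base-alphanumeric) are replaced by one pass that builds two setdefault indexes (lowercase form and alphanumeric base, first occurrence wins) followed by constant-time dict lookups in the same precedence.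
import Mathlib
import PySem

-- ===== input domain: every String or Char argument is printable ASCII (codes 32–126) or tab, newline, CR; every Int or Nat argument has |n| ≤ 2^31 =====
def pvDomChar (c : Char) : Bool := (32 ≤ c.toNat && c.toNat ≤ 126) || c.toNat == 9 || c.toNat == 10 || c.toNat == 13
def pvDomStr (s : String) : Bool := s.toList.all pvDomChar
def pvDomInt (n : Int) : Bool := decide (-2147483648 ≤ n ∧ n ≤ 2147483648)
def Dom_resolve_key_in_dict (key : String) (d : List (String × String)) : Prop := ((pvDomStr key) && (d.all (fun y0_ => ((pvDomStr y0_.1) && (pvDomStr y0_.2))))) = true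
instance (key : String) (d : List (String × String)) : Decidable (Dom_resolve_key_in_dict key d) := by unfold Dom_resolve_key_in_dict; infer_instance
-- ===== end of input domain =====

-- B replaces A's two early-return scans with one index-building pass plus dict lookups (idiomatic; same precedence).

-- ===== PORT A =====
-- _base_key: "" for empty, else keep the alphanumeric characters
def base_key (name : String) : String :=
  if name = "" then "" else String.ofList (name.toList.filter PySem.Chars.isalnum)

def resolve_key_in_dict (key : String) (d : List (String × String)) : Option String :=
  if (d.map Prod.fst).contains key then some key
  else
    let base := base_key key
    if (d.map Prod.fst).contains base then some base
    else
      let low := PySem.Str.lower key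
      -- first early-return loop over d.keys(): case-insensitive match
      match (d.map Prod.fst).find? (fun k => PySem.Str.lower k == low) with
      | some k => some k
      | none =>
        -- second early-return loop: alphabetic-only match
        match (d.map Prod.fst).find? (fun k => base_key k == base) with
        | some k => some k
        | none => none

-- ===== PORT B =====
def resolve_key_in_dict_alt (key : String) (d : List (String × String)) : Option String :=
  if (d.map Prod.fst).contains key then some key
  else
    let base := base_key key
    if (d.map Prod.fst).contains base then some base
    else
      -- one pass over d.keys(): build both indexes with setdefault (first occurrence wins)
      let idx := d.foldl
        (fun (p : PySem.Dict String String × PySem.Dict String String) kv =>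
          (p.1.setdefault (PySem.Str.lower kv.1) kv.1,
           p.2.setdefault (base_key kv.1) kv.1))
        (PySem.Dict.empty, PySem.Dict.empty)
      match idx.1.get? (PySem.Str.lower key) with
      | some k => some k
      | none => idx.2.get? base

-- ===== PRECONDITION & SPEC =====
def Spec_resolve_key_in_dict (key : String) (d : List (String × String)) (out : Option String) : Prop := out = resolve_key_in_dict_alt key d
instance (key : String) (d : List (String × String)) (out : Option String) : Decidable (Spec_resolve_key_in_dict key d out) := by unfold Spec_resolve_key_in_dict; infer_instance

-- ===== CLAIM (what is proved, stated in full; the proofs are below) =====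
def Claim_equal_resolve_key_in_dict : Prop := ∀ (key : String) (d : List (String × String)), Dom_resolve_key_in_dict key d → Spec_resolve_key_in_dict key d (resolve_key_in_dict key d)

-- ===== LEMMAS AND PROOFS =====

-- a setdefault-built index looks up to the first key whose normal form matches
theorem idx_get (f : String → String) (keys : List String)
    (acc : PySem.Dict String String) (x : String) :
    (keys.foldl (fun m k => m.setdefault (f k) k) acc).get? x =
      (acc.get? x).or (keys.find? (fun k => f k == x)) := by
  induction keys generalizing acc with
  | nil => simp [List.foldl, List.find?]
  | cons k ks ih =>
    simp only [List.foldl, List.find?, ih]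
    by_cases hx : x = f k
    · subst hx
      rw [PySem.Dict.get?_setdefault_self acc (f k) k]
      cases h : acc.get? (f k) with
      | none => simp
      | some v => simp
    · rw [PySem.Dict.get?_setdefault_of_ne acc k hx]
      have : (f k == x) = false := by
        simp; exact fun h => hx h.symm
      simp [this]

-- the paired fold splits into two independent folds over the key list
theorem pair_fold (d : List (String × String))
    (m1 m2 : PySem.Dict String String) :
    d.foldl
        (fun (p : PySem.Dict String String × PySem.Dict String String) kv =>
          (p.1.setdefault (PySem.Str.lower kv.1) kv.1,
           p.2.setdefault (base_key kv.1) kv.1)) (m1, m2) =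
      ((d.map Prod.fst).foldl (fun m k => m.setdefault (PySem.Str.lower k) k) m1,
       (d.map Prod.fst).foldl (fun m k => m.setdefault (base_key k) k) m2) := by
  induction d generalizing m1 m2 with
  | nil => simp [List.foldl]
  | cons kv rest ih => simp [List.foldl, ih]

-- ===== VERDICT (by name: the statement is the Claim_ definition above) =====
theorem resolve_key_in_dict_spec : Claim_equal_resolve_key_in_dict := by
  intro key d _
  unfold Spec_resolve_key_in_dict
  simp only [resolve_key_in_dict, resolve_key_in_dict_alt]
  by_cases h1 : ((d.map Prod.fst).contains key) = true
  · rw [if_pos h1, if_pos h1]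
  · rw [if_neg h1, if_neg h1]
    by_cases h2 : ((d.map Prod.fst).contains (base_key key)) = true
    · rw [if_pos h2, if_pos h2]
    · rw [if_neg h2, if_neg h2, pair_fold]
      simp only [idx_get, PySem.Dict.get?_empty, Option.none_or]
      cases List.find? (fun k => PySem.Str.lower k == PySem.Str.lower key) (List.map Prod.fst d) with
      | some k => rfl
      | none =>
        cases List.find? (fun k => base_key k == base_key key) (List.map Prod.fst d) <;> rfl
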